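-- pv_equiv track=rewrite | github.com/bikashshah15/Detecting-Configuration-Security-Weaknesses-via-NLP | merge_reports.py | resolve_final_severity
-- ===== SOURCE A (Python) =====
-- SEVERITY_RANK = {"CRITICAL": 3, "HIGH": 2, "MEDIUM": 1, "NONE": 0}
--
-- def resolve_final_severity(structural_issues, hardcoded_secret_findings):
--     """
--     Determine file-level severity from all findings.
--     CRITICAL > HIGH > MEDIUM > NONE
--     """
--     highest = "NONE"
--
--     for issue in structural_issues:
--         sev = issue.get("severity", "NONE")
--         if SEVERITY_RANK.get(sev, 0) > SEVERITY_RANK[highest]: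
--             highest = sev
--
--     if highest == "NONE" and hardcoded_secret_findings:
--         highest = "MEDIUM"
--
--     return highest
-- ===== SOURCE B (Python) =====
-- def resolve_final_severity(structural_issues, hardcoded_secret_findings):
--     """
--     Determine file-level severity from all findings.
--     CRITICAL > HIGH > MEDIUM > NONE
--     """
--     present = {issue.get("severity", "NONE") for issue in structural_issues}
--     for sev in ("CRITICAL", "HIGH", "MEDIUM"):
--         if sev in present:
--             return sev
--     return "MEDIUM" if hardcoded_secret_findings else "NONE"
-- ===== Notes on version B (the rewrite author's own statement) =====
-- stated objective: simpler
-- what changed: Replaces the rank-dictionary max-tracking accumulator loop with a one-pass set of present severities probed in priority order with early return.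
import Mathlib
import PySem

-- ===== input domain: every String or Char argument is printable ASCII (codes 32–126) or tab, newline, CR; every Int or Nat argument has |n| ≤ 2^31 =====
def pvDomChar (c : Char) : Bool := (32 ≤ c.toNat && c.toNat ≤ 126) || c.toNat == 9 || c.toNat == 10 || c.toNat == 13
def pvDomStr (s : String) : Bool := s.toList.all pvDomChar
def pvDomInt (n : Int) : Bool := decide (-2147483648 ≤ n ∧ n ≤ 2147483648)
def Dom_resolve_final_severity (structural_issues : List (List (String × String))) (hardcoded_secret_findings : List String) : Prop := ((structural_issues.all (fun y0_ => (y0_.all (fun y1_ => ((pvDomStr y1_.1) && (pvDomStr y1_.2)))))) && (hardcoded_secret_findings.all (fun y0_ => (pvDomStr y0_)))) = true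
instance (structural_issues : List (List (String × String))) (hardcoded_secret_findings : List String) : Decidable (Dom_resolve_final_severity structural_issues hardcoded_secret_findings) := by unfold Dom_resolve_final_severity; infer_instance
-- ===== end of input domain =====

-- B replaces A's rank-dictionary max-tracking loop by a set of present severities probed in
-- priority order (simpler decomposition; same O(n) cost).

-- ===== PORT A =====
def SEVERITY_RANK : PySem.Dict String Int :=
  PySem.Dict.mk [("CRITICAL", 3), ("HIGH", 2), ("MEDIUM", 1), ("NONE", 0)]

-- issue.get("severity", "NONE")
def sevOf (issue : List (String × String)) : String :=
  PySem.Dict.getD (PySem.Dict.mk issue) "severity" "NONE"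

-- the body of A's for-loop
-- SEVERITY_RANK[highest] is ported as getD …; 0: 'highest' is always a key of SEVERITY_RANK,
-- so the lookup never raises and getD is exact there.
def stepA (highest : String) (issue : List (String × String)) : String :=
  if PySem.Dict.getD SEVERITY_RANK (sevOf issue) 0 > PySem.Dict.getD SEVERITY_RANK highest 0
  then sevOf issue else highest

def resolve_final_severity (structural_issues : List (List (String × String))) (hardcoded_secret_findings : List String) : String :=
  let highest := structural_issues.foldl stepA "NONE"
  if highest = "NONE" ∧ hardcoded_secret_findings ≠ [] then "MEDIUM" else highest

-- ===== PORT B =====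
def resolve_final_severity_alt (structural_issues : List (List (String × String))) (hardcoded_secret_findings : List String) : String :=
  let present : PySem.Set String := PySem.Set.ofList (structural_issues.map sevOf)
  match ["CRITICAL", "HIGH", "MEDIUM"].find? (fun sev => PySem.Set.contains present sev) with
  | some sev => sev
  | none => if hardcoded_secret_findings ≠ [] then "MEDIUM" else "NONE"

-- ===== PRECONDITION & SPEC =====
def Spec_resolve_final_severity (structural_issues : List (List (String × String))) (hardcoded_secret_findings : List String) (out : String) : Prop := out = resolve_final_severity_alt structural_issues hardcoded_secret_findings
instance (structural_issues : List (List (String × String))) (hardcoded_secret_findings : List String) (out : String) : Decidable (Spec_resolve_final_severity structural_issues hardcoded_secret_findings out) := by unfold Spec_resolve_final_severity; infer_instance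

-- ===== CLAIM (what is proved, stated in full; the proofs are below) =====
def Claim_equal_resolve_final_severity : Prop := ∀ (structural_issues : List (List (String × String))) (hardcoded_secret_findings : List String), Dom_resolve_final_severity structural_issues hardcoded_secret_findings → Spec_resolve_final_severity structural_issues hardcoded_secret_findings (resolve_final_severity structural_issues hardcoded_secret_findings)

-- ===== LEMMAS AND PROOFS =====

lemma rank_unknown (s : String) (h1 : s ≠ "CRITICAL") (h2 : s ≠ "HIGH")
    (h3 : s ≠ "MEDIUM") (h4 : s ≠ "NONE") :
    PySem.Dict.getD SEVERITY_RANK s 0 = 0 := by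
  simp [SEVERITY_RANK, PySem.Dict.getD, PySem.Dict.get?, List.find?,
        beq_eq_false_iff_ne.mpr (Ne.symm h1), beq_eq_false_iff_ne.mpr (Ne.symm h2),
        beq_eq_false_iff_ne.mpr (Ne.symm h3), beq_eq_false_iff_ne.mpr (Ne.symm h4)]

lemma rank_cases (s : String) :
    PySem.Dict.getD SEVERITY_RANK s 0 =
      if s = "CRITICAL" then 3 else if s = "HIGH" then 2 else if s = "MEDIUM" then 1 else 0 := by
  by_cases h1 : s = "CRITICAL"
  · subst h1; decide
  by_cases h2 : s = "HIGH"
  · subst h2; decide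
  by_cases h3 : s = "MEDIUM"
  · subst h3; decide
  by_cases h4 : s = "NONE"
  · subst h4; decide
  simp [h1, h2, h3, rank_unknown s h1 h2 h3 h4]

-- value table for one iteration of A's loop
lemma stepA_eq (h : String) (x : List (String × String)) :
    stepA h x =
      if sevOf x = "CRITICAL" ∧ h ≠ "CRITICAL" then "CRITICAL"
      else if sevOf x = "HIGH" ∧ h ≠ "CRITICAL" ∧ h ≠ "HIGH" then "HIGH"
      else if sevOf x = "MEDIUM" ∧ h ≠ "CRITICAL" ∧ h ≠ "HIGH" ∧ h ≠ "MEDIUM" then "MEDIUM"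
      else h := by
  unfold stepA
  rw [rank_cases (sevOf x), rank_cases h]
  split_ifs <;> simp_all

-- characterisation of A's accumulator loop
set_option maxHeartbeats 1000000 in
lemma foldA_char (si : List (List (String × String))) : ∀ h : String,
    si.foldl stepA h =
      if h = "CRITICAL" ∨ "CRITICAL" ∈ si.map sevOf then "CRITICAL"
      else if h = "HIGH" ∨ "HIGH" ∈ si.map sevOf then "HIGH"
      else if h = "MEDIUM" ∨ "MEDIUM" ∈ si.map sevOf then "MEDIUM"
      else h := by
  induction si with
  | nil =>
    intro h
    simp only [List.foldl_nil, List.map_nil, List.not_mem_nil, or_false]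
    split_ifs <;> simp_all
  | cons x xs ih =>
    intro h
    simp only [List.foldl_cons, List.map_cons, List.mem_cons]
    rw [ih (stepA h x), stepA_eq]
    by_cases hxc : sevOf x = "CRITICAL" <;> by_cases hxh : sevOf x = "HIGH" <;>
    by_cases hxm : sevOf x = "MEDIUM" <;> by_cases hhc : h = "CRITICAL" <;>
    by_cases hhh : h = "HIGH" <;> by_cases hhm : h = "MEDIUM" <;>
      simp_all [eq_comm] <;> by_cases hc2 : "CRITICAL" = sevOf x <;> simp_all

-- ===== VERDICT (by name: the statement is the Claim_ definition above) =====
theorem resolve_final_severity_spec : Claim_equal_resolve_final_severity := by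
  intro si hs _
  unfold Spec_resolve_final_severity resolve_final_severity resolve_final_severity_alt
  rw [foldA_char si "NONE"]
  by_cases hC : "CRITICAL" ∈ si.map sevOf <;>
  by_cases hH : "HIGH" ∈ si.map sevOf <;>
  by_cases hM : "MEDIUM" ∈ si.map sevOf <;>
  by_cases hhs : hs = [] <;>
    simp [List.find?, PySem.Set.mem_ofList, hC, hH, hM, hhs]
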